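-- pv_equiv track=rewrite | github.com/peternemser-ui/AI-Medical-Diagnosis-Assistant | backend/main.py | assess_urgency_from_diagnoses
-- ===== SOURCE A (Python) =====
-- def assess_urgency_from_diagnoses(diagnoses, red_flags):
--     """Assess urgency based on AI diagnoses and red flags"""
--
--     if red_flags:
--         return "urgent"
--
--     if not diagnoses:
--         return "routine"
--
--     # Check urgency levels from AI diagnoses
--     urgency_levels = [d.get("urgency", "routine") for d in diagnoses]
--
--     if "urgent" in urgency_levels:
--         return "urgent"
--     elif "soon" in urgency_levels:
--         return "soon"
--     else:
--         return "routine"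
-- ===== SOURCE B (Python) =====
-- def assess_urgency_from_diagnoses(diagnoses, red_flags):
--     """Assess urgency based on AI diagnoses and red flags"""
--     if red_flags:
--         return "urgent"
--     # numeric max-reduction: encode urgencies as ranks, take the maximum, decode
--     RANK = {"urgent": 2, "soon": 1}
--     level = 0
--     for d in diagnoses:
--         level = max(level, RANK.get(d.get("urgency", "routine"), 0))
--     return ("routine", "soon", "urgent")[level]
-- ===== Notes on version B (the rewrite author's own statement) =====
-- stated objective: alternative
-- what changed: Replaces the string-membership logic (build urgency_levels list, test 'urgent' in it, then 'soon' in it) with a numeric max-reduction: each urgency is encoded as a rank (urgent=2, soon=1, else 0), the maximum rank is folded over the diagnoses, and the result is decoded from a tuple; the empty-diagnoses guard disappears since the fold's identity 0 decodes to 'routine'.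
import Mathlib
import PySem

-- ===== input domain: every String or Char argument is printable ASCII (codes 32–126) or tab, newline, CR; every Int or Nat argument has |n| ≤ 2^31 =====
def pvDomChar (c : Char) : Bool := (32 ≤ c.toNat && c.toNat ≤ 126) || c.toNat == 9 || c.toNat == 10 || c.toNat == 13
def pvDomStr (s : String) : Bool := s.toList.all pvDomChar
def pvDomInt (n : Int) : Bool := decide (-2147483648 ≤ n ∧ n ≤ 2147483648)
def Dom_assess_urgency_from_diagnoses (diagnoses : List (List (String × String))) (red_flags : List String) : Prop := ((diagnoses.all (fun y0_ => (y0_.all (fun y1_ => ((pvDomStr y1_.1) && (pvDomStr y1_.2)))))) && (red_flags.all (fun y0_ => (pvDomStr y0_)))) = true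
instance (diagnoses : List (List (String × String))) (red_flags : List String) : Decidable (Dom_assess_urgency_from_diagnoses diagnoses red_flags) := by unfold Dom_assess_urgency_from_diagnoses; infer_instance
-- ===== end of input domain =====

-- B replaces the list-of-strings plus two membership scans with a numeric max-reduction
-- (urgent=2, soon=1, else 0; fold max; decode) — objective: alternative decomposition.
-- ===== PORT A =====
def assess_urgency_from_diagnoses (diagnoses : List (List (String × String))) (red_flags : List String) : String :=
  if red_flags ≠ [] then "urgent"
  else if diagnoses = [] then "routine"
  else
    let urgency_levels := diagnoses.map (fun d => (PySem.Dict.mk d).getD "urgency" "routine")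
    if urgency_levels.contains "urgent" then "urgent"
    else if urgency_levels.contains "soon" then "soon"
    else "routine"

-- ===== PORT B =====
-- RANK.get(u, 0) with RANK = {"urgent": 2, "soon": 1}
def pvRank (u : String) : Nat :=
  (PySem.Dict.mk [("urgent", 2), ("soon", 1)]).getD u 0

def assess_urgency_from_diagnoses_alt (diagnoses : List (List (String × String))) (red_flags : List String) : String :=
  if red_flags ≠ [] then "urgent"
  else
    let level := diagnoses.foldl (fun acc d => max acc (pvRank ((PySem.Dict.mk d).getD "urgency" "routine"))) 0
    -- ("routine", "soon", "urgent")[level]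
    if level = 0 then "routine" else if level = 1 then "soon" else "urgent"

-- ===== PRECONDITION & SPEC =====
def Spec_assess_urgency_from_diagnoses (diagnoses : List (List (String × String))) (red_flags : List String) (out : String) : Prop := out = assess_urgency_from_diagnoses_alt diagnoses red_flags
instance (diagnoses : List (List (String × String))) (red_flags : List String) (out : String) : Decidable (Spec_assess_urgency_from_diagnoses diagnoses red_flags out) := by unfold Spec_assess_urgency_from_diagnoses; infer_instance

-- ===== CLAIM (what is proved, stated in full; the proofs are below) =====
def Claim_equal_assess_urgency_from_diagnoses : Prop := ∀ (diagnoses : List (List (String × String))) (red_flags : List String), Dom_assess_urgency_from_diagnoses diagnoses red_flags → Spec_assess_urgency_from_diagnoses diagnoses red_flags (assess_urgency_from_diagnoses diagnoses red_flags)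

-- ===== LEMMAS AND PROOFS =====

lemma pvRank_eq (u : String) :
    pvRank u = if u = "urgent" then 2 else if u = "soon" then 1 else 0 := by
  unfold pvRank
  rw [PySem.Dict.getD_eq_get?_getD, PySem.Dict.get?_mk_cons, PySem.Dict.get?_mk_cons]
  by_cases h2 : u = "urgent"
  · simp [h2]
  · by_cases h1 : u = "soon"
    · simp [h1]
    · have h2' : ¬("urgent" == u) = true := by simp; exact fun h => h2 h.symm
      have h1' : ¬("soon" == u) = true := by simp; exact fun h => h1 h.symm
      simp [h2', h1', h2, h1, PySem.Dict.get?]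

-- the maximum rank over a list, matching A's membership tests
def pvM (ds : List (List (String × String))) : Nat :=
  if (ds.map (fun d => (PySem.Dict.mk d).getD "urgency" "routine")).contains "urgent" then 2
  else if (ds.map (fun d => (PySem.Dict.mk d).getD "urgency" "routine")).contains "soon" then 1
  else 0

lemma rank_max (u : String) (c2 c1 : Bool) :
    (if ("urgent" == u || c2) then (2 : Nat) else if ("soon" == u || c1) then 1 else 0)
      = max (if u = "urgent" then 2 else if u = "soon" then 1 else 0)
            (if c2 then 2 else if c1 then 1 else 0) := by
  by_cases h2 : u = "urgent"
  · subst h2; rcases c2 <;> rcases c1 <;> simp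
  · have e2 : ("urgent" == u) = false := by simp; exact fun h => h2 h.symm
    by_cases h1 : u = "soon"
    · subst h1; rcases c2 <;> rcases c1 <;> simp [e2]
    · have e1 : ("soon" == u) = false := by simp; exact fun h => h1 h.symm
      rcases c2 <;> rcases c1 <;> simp [e2, e1, h2, h1]

lemma pvM_cons (d : List (String × String)) (rest : List (List (String × String))) :
    pvM (d :: rest) = max (pvRank ((PySem.Dict.mk d).getD "urgency" "routine")) (pvM rest) := by
  rw [pvRank_eq]
  simp only [pvM, List.map_cons, List.contains_cons]
  exact rank_max _ _ _

lemma fold_char (ds : List (List (String × String))) (a : Nat) :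
    ds.foldl (fun acc d => max acc (pvRank ((PySem.Dict.mk d).getD "urgency" "routine"))) a
      = max a (pvM ds) := by
  induction ds generalizing a with
  | nil => simp [pvM]
  | cons d rest ih =>
    simp only [List.foldl_cons, ih, pvM_cons]
    omega

-- ===== VERDICT (by name: the statement is the Claim_ definition above) =====
theorem assess_urgency_from_diagnoses_spec : Claim_equal_assess_urgency_from_diagnoses := by
  intro diagnoses red_flags _
  unfold Spec_assess_urgency_from_diagnoses assess_urgency_from_diagnoses assess_urgency_from_diagnoses_alt
  by_cases hrf : red_flags = []
  · simp only [hrf, ne_eq, not_true_eq_false, if_false, fold_char, Nat.zero_max]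
    by_cases hd : diagnoses = []
    · simp [hd, pvM]
    · simp only [hd, if_false]
      unfold pvM
      split_ifs <;> simp_all
  · simp [hrf]
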